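-- pv_equiv track=rewrite | github.com/PaperMtn/lil-pwny | src/lil_pwny/variant_generators/custom_variant_generator.py | _add_leet_speak
-- ===== SOURCE A (Python) =====
-- from typing import List
--
-- def _add_leet_speak(password: str) -> List[str]:
--     """ Add leetspeak variations to a single password"""
--
--     leet_speak_mappings = {
--         'a': ['4', '@'],
--         'b': ['8'],
--         'e': ['3'],
--         'g': ['6'],
--         'i': ['1', '!'],
--         'l': ['1'],
--         'o': ['0'],
--         's': ['5', '$'],
--         't': ['7'],
--         'z': ['2'],
--     }
--
--     def _generate_variations(word: str, index: int = 0) -> List[str]: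
--         if index == len(word):
--             return [word]
--         current_char = word[index]
--         variations = _generate_variations(word, index + 1)
--         if current_char.lower() in leet_speak_mappings:
--             additional_variations = []
--             for leet_char in leet_speak_mappings[current_char.lower()]:
--                 for variation in variations:
--                     additional_variations.append(variation[:index] + leet_char + variation[index + 1:])
--             variations.extend(additional_variations)
--         return variations
--
--     return _generate_variations(password)
-- ===== SOURCE B (Python) =====
-- from typing import List
--
-- def _add_leet_speak(password: str) -> List[str]:
--     """Add leetspeak variations to a single password (iterative cross-product)."""
--     leet_speak_mappings = {
--         'a': ['4', '@'], 'b': ['8'], 'e': ['3'], 'g': ['6'],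
--         'i': ['1', '!'], 'l': ['1'], 'o': ['0'], 's': ['5', '$'],
--         't': ['7'], 'z': ['2'],
--     }
--     results = ['']
--     for ch in password:
--         choices = [ch] + leet_speak_mappings.get(ch.lower(), [])
--         results = [prefix + c for prefix in results for c in choices]
--     return results
-- ===== Notes on version B (the rewrite author's own statement) =====
-- stated objective: idiomatic
-- what changed: Replaced the index-based recursion that rebuilds each variation by string slicing with a single left-to-right fold that extends every accumulated prefix by each character's choice list (original char first, then its leet substitutes), producing the identical cross-product in the identical order.
import Mathlib
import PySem

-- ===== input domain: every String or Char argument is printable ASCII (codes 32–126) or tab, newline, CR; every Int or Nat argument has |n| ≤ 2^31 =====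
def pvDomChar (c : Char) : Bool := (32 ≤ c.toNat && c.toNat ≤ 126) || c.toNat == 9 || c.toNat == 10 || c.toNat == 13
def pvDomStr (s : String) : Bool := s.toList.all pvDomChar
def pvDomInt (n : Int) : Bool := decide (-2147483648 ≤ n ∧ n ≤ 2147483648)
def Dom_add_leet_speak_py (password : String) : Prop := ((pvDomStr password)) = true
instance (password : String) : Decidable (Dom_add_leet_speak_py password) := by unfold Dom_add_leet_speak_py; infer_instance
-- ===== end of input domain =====

-- B replaces A's index recursion + slice splicing with one fold over the password
-- extending every accumulated prefix by each character's choice list; same return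
-- value (and order) on every input, no speed claim.

-- the leet_speak_mappings dict literal both Pythons define (keys/values as chars,
-- since all mapped strings are single characters)
def leetMappings : PySem.Dict Char (List Char) :=
  PySem.Dict.ofList [('a', ['4','@']), ('b', ['8']), ('e', ['3']), ('g', ['6']),
    ('i', ['1','!']), ('l', ['1']), ('o', ['0']), ('s', ['5','$']),
    ('t', ['7']), ('z', ['2'])]

-- ===== PORT A =====
-- strings handled on the List Char side (PySem convention): word[index] is
-- PySem.List.pyGet?, variation[:index] / variation[index+1:] are PySem.List.slice
def genVariations (word : List Char) (index : Nat) : List (List Char) :=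
  if index = word.length then [word]
  else
    match h : PySem.List.pyGet? word (index : Int) with
    | none => []   -- Python would raise IndexError here; unreachable from index 0
    | some current =>
      let variations := genVariations word (index + 1)
      match PySem.Dict.get? leetMappings (PySem.Chars.lowerChar current) with
      | none => variations
      | some leets =>
        let additional := leets.foldl (fun acc leet =>
          acc ++ variations.map (fun v =>
            PySem.List.slice v none (some (index : Int)) ++ [leet] ++
              PySem.List.slice v (some ((index : Int) + 1)) none)) []
        variations ++ additional
termination_by word.length - index
decreasing_by
  have hlt : index < word.length := by
    by_contra hge
    simp only [PySem.List.pyGet?_natCast] at h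
    rw [List.getElem?_eq_none (by omega)] at h
    simp at h
  omega

def add_leet_speak_py (password : String) : List String :=
  (genVariations password.toList 0).map (fun cs => String.ofList cs)

-- ===== PORT B =====
def add_leet_speak_py_alt (password : String) : List String :=
  (password.toList.foldl
    (fun results ch =>
      let choices := ch :: PySem.Dict.getD leetMappings (PySem.Chars.lowerChar ch) []
      results.flatMap (fun pre => choices.map (fun c => pre ++ [c])))
    [[]]).map (fun cs => String.ofList cs)

-- ===== PRECONDITION & SPEC =====
def Spec_add_leet_speak_py (password : String) (out : List String) : Prop := out = add_leet_speak_py_alt password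
instance (password : String) (out : List String) : Decidable (Spec_add_leet_speak_py password out) := by unfold Spec_add_leet_speak_py; infer_instance

-- ===== CLAIM (what is proved, stated in full; the proofs are below) =====
def Claim_equal_add_leet_speak_py : Prop := ∀ (password : String), Dom_add_leet_speak_py password → Spec_add_leet_speak_py password (add_leet_speak_py password)

-- ===== LEMMAS AND PROOFS =====

-- the per-character choice list and the ordered cross-product (proof vocabulary)
def choicesOf (c : Char) : List Char :=
  c :: PySem.Dict.getD leetMappings (PySem.Chars.lowerChar c) []

def prodC : List Char → List (List Char)
  | [] => [[]]
  | c :: rest => (choicesOf c).flatMap (fun ch => (prodC rest).map (ch :: ·))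

lemma genVariations_eq (rest : List Char) : ∀ pre : List Char,
    genVariations (pre ++ rest) pre.length = (prodC rest).map (pre ++ ·) := by
  induction rest with
  | nil => intro pre; simp [genVariations, prodC]
  | cons c rest ih =>
    intro pre
    rw [genVariations]
    have hne : pre.length ≠ (pre ++ c :: rest).length := by simp
    rw [if_neg hne]
    have hget : PySem.List.pyGet? (pre ++ c :: rest) (pre.length : Int) = some c :=
      PySem.List.pyGet?_append_length pre rest c
    -- rewrite the dependent match on pyGet?
    have ihc : genVariations (pre ++ c :: rest) (pre.length + 1) =
        (prodC rest).map ((pre ++ [c]) ++ ·) := by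
      have h2 := ih (pre ++ [c])
      simpa using h2
    rw [hget]
    cases hm : PySem.Dict.get? leetMappings (PySem.Chars.lowerChar c) with
    | none =>
      simp only [ihc, prodC, choicesOf, PySem.Dict.getD, hm]
      simp
    | some leets =>
      simp only [ihc, prodC, choicesOf, PySem.Dict.getD, hm,
        PySem.List.foldl_append_eq_flatMap]
      have hrepl : ∀ (leet : Char) (x : List Char),
          PySem.List.slice (pre ++ [c] ++ x) none (some (pre.length : Int)) ++ [leet] ++
            PySem.List.slice (pre ++ [c] ++ x) (some ((pre.length : Int) + 1)) none
          = pre ++ [leet] ++ x := by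
        intro leet x
        have hcast : ((pre.length : Int) + 1) = (((pre.length + 1 : Nat)) : Int) := by
          push_cast; ring
        rw [PySem.List.slice_to_natCast, hcast, PySem.List.slice_from_natCast]
        have hlen : (pre ++ [c]).length = pre.length + 1 := by simp
        rw [List.drop_left' hlen]
        simp
      simp only [List.map_map, Function.comp_def, hrepl]
      simp [List.map_flatMap, Function.comp_def]

lemma foldl_step_eq (cs : List Char) : ∀ acc : List (List Char),
    cs.foldl (fun results ch =>
      results.flatMap (fun pre => (ch :: PySem.Dict.getD leetMappings (PySem.Chars.lowerChar ch) []).map (fun c => pre ++ [c]))) acc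
      = acc.flatMap (fun p => (prodC cs).map (p ++ ·)) := by
  induction cs with
  | nil => intro acc; simp [prodC]
  | cons c cs ih =>
    intro acc
    simp only [List.foldl_cons, ih, prodC, choicesOf]
    simp [List.flatMap_assoc, List.map_flatMap, List.flatMap_map, Function.comp_def]

-- ===== VERDICT (by name: the statement is the Claim_ definition above) =====
theorem add_leet_speak_py_spec : Claim_equal_add_leet_speak_py := by
  intro password _
  unfold Spec_add_leet_speak_py add_leet_speak_py add_leet_speak_py_alt
  have hA : genVariations password.toList 0 = prodC password.toList := by
    have := genVariations_eq password.toList []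
    simpa using this
  rw [hA, foldl_step_eq]
  simp
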